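-- pv_equiv track=rewrite | github.com/gsavelev/bzip2 | mtf/transformation.py | transform
-- ===== SOURCE A (Python) =====
-- def transform(s: str) -> list:
--     s_list = sorted(list({*s}))  # make ordered list of symbols
--     transformed = []
--     for i in range(len(s)):
--         s_idx = s_list.index(s[i])
--         transformed.append(s_idx)
--         s_list.insert(0, s_list[s_idx])
--         del s_list[s_idx + 1]  # + 1 here to compensate insert above
--     return transformed, s_list
-- ===== SOURCE B (Python) =====
-- def transform(s: str) -> list:
--     # MTF index of s[i] = number of distinct symbols whose most recent occurrence
--     # is later than that of s[i]; computed from a last-occurrence dictionary,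
--     # no mutable symbol table. Final order = symbols by most recent occurrence.
--     alpha = sorted(set(s))
--     last = {}  # symbol -> index of its most recent occurrence
--     out = []
--     for i, c in enumerate(s):
--         if c in last:
--             out.append(sum(1 for t in last.values() if t > last[c]))
--         else:
--             out.append(len(last) + sum(1 for d in alpha if d < c and d not in last))
--         last[c] = i
--     return out, list(dict.fromkeys(reversed(s)))
-- ===== Notes on version B (the rewrite author's own statement) =====
-- stated objective: alternative
-- what changed: Replaces the mutable move-to-front symbol table (index/insert/del per character) by a last-occurrence dictionary: each index is computed as the number of distinct symbols seen more recently, and the final symbol order is read off as the ordered dedup of the reversed string.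
import Mathlib
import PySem

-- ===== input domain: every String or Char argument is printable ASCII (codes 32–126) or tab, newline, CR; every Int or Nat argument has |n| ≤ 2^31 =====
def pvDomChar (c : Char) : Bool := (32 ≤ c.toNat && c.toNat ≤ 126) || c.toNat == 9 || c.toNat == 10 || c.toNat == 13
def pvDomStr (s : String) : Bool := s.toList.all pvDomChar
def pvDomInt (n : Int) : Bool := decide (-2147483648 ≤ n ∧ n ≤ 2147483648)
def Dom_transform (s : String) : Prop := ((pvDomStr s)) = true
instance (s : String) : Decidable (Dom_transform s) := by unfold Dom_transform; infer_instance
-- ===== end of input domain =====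

-- B replaces A's mutable move-to-front table (index/insert/del per character) by a
-- last-occurrence dictionary (alternative algorithm, similar cost). Single-character Python
-- strings are modelled as Char internally and converted to 1-character Strings at return
-- (Python's str order on 1-character strings is exactly Char order).

-- ===== PORT A =====
-- one iteration of A's loop body: index, append, s_list[s_idx], insert(0,·), del [s_idx+1]
def mtfStepA (st : List Int × List Char) (c : Char) : List Int × List Char :=
  let sIdx : Nat := (PySem.List.index? st.2 c).getD 0      -- s_list.index(s[i]); never fails: s[i] ∈ s_list
  let transformed := st.1 ++ [(sIdx : Int)]
  let x : Char := (PySem.List.pyGet? st.2 (sIdx : Int)).getD c   -- s_list[s_idx]; always in range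
  let l1 := PySem.List.insert st.2 0 x                      -- s_list.insert(0, ·)
  let l2 := ((PySem.List.pop? l1 ((sIdx : Int) + 1)).map (fun r => r.2)).getD l1  -- del s_list[s_idx+1]
  (transformed, l2)

def transform (s : String) : List Int × List String :=
  let sList := PySem.List.sorted (PySem.Set.ofList s.toList) (fun c => c) false  -- sorted(list({*s}))
  let r := s.toList.foldl mtfStepA ([], sList)
  (r.1, r.2.map (fun c => String.ofList [c]))

-- ===== PORT B =====
-- one iteration of B's loop body over enumerate(s): dict test / two counting sums, then last[c] = i
def mtfStepB (alpha : List Char) (st : PySem.Dict Char Int × List Int) (ic : Int × Char) :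
    PySem.Dict Char Int × List Int :=
  let idx : Int :=
    if st.1.contains ic.2 then
      ((st.1.values.countP (fun t => decide (st.1.getD ic.2 0 < t)) : Nat) : Int)  -- sum(1 for t in last.values() if t > last[c])
    else
      (st.1.size : Int) + ((alpha.countP (fun d => decide (d < ic.2) && !(st.1.contains d)) : Nat) : Int)
  (st.1.insert ic.2 ic.1, st.2 ++ [idx])

def transform_alt (s : String) : List Int × List String :=
  let alpha := PySem.List.sorted (PySem.Set.ofList s.toList) (fun c => c) false  -- sorted(set(s))
  let r := (PySem.List.enumerate s.toList).foldl (mtfStepB alpha) (PySem.Dict.empty, [])  -- for i, c in enumerate(s)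
  (r.2, (PySem.List.dedup s.toList.reverse).map (fun c => String.ofList [c]))    -- list(dict.fromkeys(reversed(s)))

-- ===== PRECONDITION & SPEC =====
def Spec_transform (s : String) (out : List Int × List String) : Prop := out = transform_alt s
instance (s : String) (out : List Int × List String) : Decidable (Spec_transform s out) := by unfold Spec_transform; infer_instance

-- ===== CLAIM (what is proved, stated in full; the proofs are below) =====
def Claim_equal_transform : Prop := ∀ (s : String), Dom_transform s → Spec_transform s (transform s)

-- ===== LEMMAS AND PROOFS =====

-- index (as Int) of the most recent occurrence of c in p, -1 if absent
def lastIdx (p : List Char) (c : Char) : Int :=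
  p.zipIdx.foldl (fun a xi => if xi.1 = c then (xi.2 : Int) else a) (-1)

-- distinct symbols of p, most recently seen first (A's "seen" prefix of s_list)
def recency (p : List Char) : List Char := PySem.List.dedup p.reverse

-- symbols of alpha not yet seen (A's "unseen" suffix of s_list)
def unseen (alpha p : List Char) : List Char := alpha.filter (fun d => !decide (d ∈ p))

-- B's dictionary after processing prefix p
def lastDict (p : List Char) : PySem.Dict Char Int :=
  PySem.Dict.mk ((PySem.List.dedup p).map (fun d => (d, lastIdx p d)))

theorem lastIdx_append (p : List Char) (c d : Char) :
    lastIdx (p ++ [c]) d = if d = c then (p.length : Int) else lastIdx p d := by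
  unfold lastIdx
  rw [List.zipIdx_append, List.foldl_append]
  simp only [List.zipIdx_cons, List.zipIdx_nil, List.foldl_cons, List.foldl_nil]
  rcases eq_or_ne d c with h | h
  · subst h; simp
  · simp [h, Ne.symm h]

theorem lastIdx_lt (p : List Char) (c : Char) : lastIdx p c < (p.length : Int) := by
  induction p using List.reverseRecOn with
  | nil => simp [lastIdx]
  | append_singleton p x ih =>
      rw [lastIdx_append]
      simp only [List.length_append, List.length_cons, List.length_nil]
      split_ifs with h
      · push_cast; omega
      · push_cast; omega

theorem recency_append (p : List Char) (c : Char) :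
    recency (p ++ [c]) = c :: (recency p).filter (fun y => !(y == c)) := by
  unfold recency
  rw [List.reverse_append]
  simp only [List.reverse_cons, List.reverse_nil, List.nil_append, List.singleton_append]
  rw [PySem.List.dedup_eq_ofList, PySem.List.dedup_eq_ofList, PySem.Set.ofList_cons]
  rfl

theorem mem_recency (p : List Char) (d : Char) : d ∈ recency p ↔ d ∈ p := by
  unfold recency
  rw [PySem.List.mem_dedup, List.mem_reverse]

theorem nodup_recency (p : List Char) : (recency p).Nodup := PySem.List.nodup_dedup _

theorem recency_perm_dedup (p : List Char) : (recency p).Perm (PySem.List.dedup p) := by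
  rw [List.perm_ext_iff_of_nodup (nodup_recency p) (PySem.List.nodup_dedup p)]
  intro a
  rw [mem_recency, PySem.List.mem_dedup]

theorem recency_pairwise (p : List Char) :
    (recency p).Pairwise (fun a b => lastIdx p b < lastIdx p a) := by
  induction p using List.reverseRecOn with
  | nil => simp [recency, PySem.List.dedup]
  | append_singleton p c ih =>
      rw [recency_append]
      constructor
      · intro b hb
        rw [List.mem_filter] at hb
        have hbc : b ≠ c := by simpa using hb.2
        rw [lastIdx_append, lastIdx_append, if_pos rfl, if_neg hbc]
        have := lastIdx_lt p b; omega
      · have hf : ((recency p).filter (fun y => !(y == c))).Pairwise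
            (fun a b => lastIdx p b < lastIdx p a) := ih.filter _
        refine hf.imp_of_mem ?_
        intro a b ha hb hab
        rw [List.mem_filter] at ha hb
        have hac : a ≠ c := by simpa using ha.2
        have hbc : b ≠ c := by simpa using hb.2
        rw [lastIdx_append, lastIdx_append, if_neg hac, if_neg hbc]
        exact hab

-- position in a strictly key-descending list = number of strictly larger keys
theorem index?_desc (key : Char → Int) :
    ∀ (q : List Char), q.Pairwise (fun a b => key b < key a) → ∀ c ∈ q,
      PySem.List.index? q c = some (q.countP (fun d => decide (key c < key d))) := by
  intro q
  induction q with
  | nil => intro _ c hc; cases hc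
  | cons x t ih =>
      intro hpw c hc
      have hx : ∀ b ∈ t, key b < key x := fun b hb => List.rel_of_pairwise_cons hpw hb
      rcases eq_or_ne x c with h | h
      · subst h
        rw [PySem.List.index?_cons_self]
        have h0 : (x :: t).countP (fun d => decide (key x < key d)) = 0 := by
          rw [List.countP_eq_zero]
          intro d hd
          rcases List.mem_cons.mp hd with rfl | hd
          · simp
          · have := hx d hd; simp; omega
        rw [h0]
      · have hct : c ∈ t := by rcases List.mem_cons.mp hc with h' | h' <;> [exact absurd h'.symm h; exact h']
        rw [PySem.List.index?_cons_of_ne _ h, ih hpw.of_cons c hct]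
        have : key c < key x := hx c hct
        simp only [List.countP_cons, Option.map_some]
        simp [this]

-- position in a strictly increasing list = number of smaller elements
theorem index?_asc :
    ∀ (q : List Char), q.Pairwise (· < ·) → ∀ c ∈ q,
      PySem.List.index? q c = some (q.countP (fun d => decide (d < c))) := by
  intro q
  induction q with
  | nil => intro _ c hc; cases hc
  | cons x t ih =>
      intro hpw c hc
      have hx : ∀ b ∈ t, x < b := fun b hb => List.rel_of_pairwise_cons hpw hb
      rcases eq_or_ne x c with h | h
      · subst h
        rw [PySem.List.index?_cons_self]
        have h0 : (x :: t).countP (fun d => decide (d < x)) = 0 := by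
          rw [List.countP_eq_zero]
          intro d hd
          rcases List.mem_cons.mp hd with rfl | hd
          · simp
          · have := hx d hd; simp; exact le_of_lt this
        rw [h0]
      · have hct : c ∈ t := by rcases List.mem_cons.mp hc with h' | h' <;> [exact absurd h'.symm h; exact h']
        rw [PySem.List.index?_cons_of_ne _ h, ih hpw.of_cons c hct]
        have : x < c := hx c hct
        simp only [List.countP_cons, Option.map_some]
        simp [this]

theorem index?_append_right {l t : List Char} {c : Char} (hc : c ∉ l) :
    PySem.List.index? (l ++ t) c = (PySem.List.index? t c).map (l.length + ·) := by
  induction l with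
  | nil => simp [Option.map_id']
  | cons x l ih =>
      have hxc : x ≠ c := fun h => hc (h ▸ List.mem_cons_self)
      have hcl : c ∉ l := fun h => hc (List.mem_cons_of_mem _ h)
      rw [List.cons_append, PySem.List.index?_cons_of_ne _ hxc, ih hcl]
      cases PySem.List.index? t c
      · simp
      · simp; omega

theorem eraseIdx_index? {l : List Char} {c : Char} {k : Nat} (hnd : l.Nodup)
    (hk : PySem.List.index? l c = some k) :
    l.eraseIdx k = l.filter (fun y => !(y == c)) := by
  induction l generalizing k with
  | nil => simp [PySem.List.index?] at hk
  | cons x t ih =>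
      rcases eq_or_ne x c with h | h
      · subst h
        rw [PySem.List.index?_cons_self] at hk
        obtain rfl : k = 0 := by simpa using hk.symm
        have hxt : x ∉ t := (List.nodup_cons.mp hnd).1
        rw [List.eraseIdx_cons_zero, List.filter_cons]
        have hft : List.filter (fun y => !(y == x)) t = t := List.filter_eq_self.mpr (by
          intro y hy
          simp only [Bool.not_eq_eq_eq_not, Bool.not_true, beq_eq_false_iff_ne, ne_eq]
          exact fun h' => hxt (h' ▸ hy))
        simp [hft]
      · rw [PySem.List.index?_cons_of_ne _ h] at hk
        cases hj : PySem.List.index? t c with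
        | none => rw [hj] at hk; simp at hk
        | some j =>
            rw [hj] at hk
            obtain rfl : k = j + 1 := by simpa using hk.symm
            rw [List.eraseIdx_cons_succ, List.filter_cons,
              ih (List.nodup_cons.mp hnd).2 hj]
            simp [h]

theorem nodup_unseen (alpha p : List Char) (hpw : alpha.Pairwise (· < ·)) :
    (unseen alpha p).Nodup :=
  ((hpw.imp fun h => ne_of_lt h).filter _)

theorem mem_unseen (alpha p : List Char) (d : Char) :
    d ∈ unseen alpha p ↔ d ∈ alpha ∧ d ∉ p := by
  simp [unseen]

theorem unseen_append (alpha p : List Char) (c : Char) :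
    unseen alpha (p ++ [c]) = (unseen alpha p).filter (fun y => !(y == c)) := by
  unfold unseen
  rw [List.filter_filter]
  apply List.filter_congr
  intro d _
  by_cases h1 : d = c <;> by_cases h2 : d ∈ p <;> simp [h1, h2]

theorem nodup_state (alpha p : List Char) (hpw : alpha.Pairwise (· < ·)) :
    (recency p ++ unseen alpha p).Nodup := by
  rw [List.nodup_append]
  refine ⟨nodup_recency p, nodup_unseen alpha p hpw, ?_⟩
  intro a ha b hb
  rw [mem_recency] at ha
  rw [mem_unseen] at hb
  exact fun e => hb.2 (e ▸ ha)

-- what s_list.index(s[i]) returns on the invariant state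
theorem index_char (alpha p : List Char) (c : Char)
    (hpw : alpha.Pairwise (· < ·)) (hc : c ∈ alpha) :
    PySem.List.index? (recency p ++ unseen alpha p) c
      = some (if c ∈ p then (recency p).countP (fun d => decide (lastIdx p c < lastIdx p d))
              else (recency p).length + (unseen alpha p).countP (fun d => decide (d < c))) := by
  by_cases hcp : c ∈ p
  · rw [if_pos hcp, PySem.List.index?_append_of_mem _ ((mem_recency p c).mpr hcp)]
    exact index?_desc (lastIdx p) (recency p) (recency_pairwise p)
      c ((mem_recency p c).mpr hcp)
  · have hcr : c ∉ recency p := fun h => hcp ((mem_recency p c).mp h)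
    have hcu : c ∈ unseen alpha p := (mem_unseen alpha p c).mpr ⟨hc, hcp⟩
    rw [if_neg hcp, index?_append_right hcr,
      index?_asc (unseen alpha p) (hpw.filter _) c hcu]
    rfl

theorem stepA_eq (alpha p : List Char) (c : Char) (out : List Int)
    (hpw : alpha.Pairwise (· < ·)) (hc : c ∈ alpha) :
    mtfStepA (out, recency p ++ unseen alpha p) c
      = (out ++ [((PySem.List.index? (recency p ++ unseen alpha p) c).getD 0 : Int)],
         recency (p ++ [c]) ++ unseen alpha (p ++ [c])) := by
  set L := recency p ++ unseen alpha p with hL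
  have hcL : c ∈ L := by
    rw [hL, List.mem_append, mem_recency, mem_unseen]
    by_cases hcp : c ∈ p
    · exact Or.inl hcp
    · exact Or.inr ⟨hc, hcp⟩
  obtain ⟨k, hk⟩ := Option.isSome_iff_exists.mp ((PySem.List.index?_isSome_iff L c).mpr hcL)
  obtain ⟨hklt, hLk, -⟩ := PySem.List.getElem_of_index?_eq_some hk
  simp only [mtfStepA, hk, Option.getD_some]
  have hget : PySem.List.pyGet? L ((k : Nat) : Int) = some c := by
    rw [PySem.List.pyGet?_natCast, List.getElem?_eq_getElem hklt, hLk]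
  rw [hget]
  simp only [Option.getD_some]
  have hins : PySem.List.insert L 0 c = c :: L := by
    simp [PySem.List.insert, PySem.List.sliceIndices]
  rw [hins]
  have hcast : ((k : Int) + 1) = (((k + 1 : Nat)) : Int) := by push_cast; ring
  rw [hcast, PySem.List.pop?_natCast (c :: L) (k + 1) (by simp only [List.length_cons]; omega)]
  simp only [Option.map_some, Option.getD_some, List.eraseIdx_cons_succ]
  rw [eraseIdx_index? (nodup_state alpha p hpw) hk]
  rw [recency_append, unseen_append, List.filter_append]
  rfl

theorem get?_mk_map (f : Char → Int) :
    ∀ (l : List Char), ∀ c ∈ l, (PySem.Dict.mk (l.map (fun d => (d, f d)))).get? c = some (f c) := by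
  intro l
  induction l with
  | nil => intro c hc; cases hc
  | cons x t ih =>
      intro c hc
      rw [List.map_cons, PySem.Dict.get?_mk_cons]
      rcases eq_or_ne x c with h | h
      · subst h; simp
      · have hct : c ∈ t := by rcases List.mem_cons.mp hc with h' | h' <;> [exact absurd h'.symm h; exact h']
        rw [if_neg (by simpa using h)]
        exact ih c hct

theorem get?_lastDict (p : List Char) (c : Char) (hc : c ∈ p) :
    (lastDict p).get? c = some (lastIdx p c) :=
  get?_mk_map (lastIdx p) (PySem.List.dedup p) c ((PySem.List.mem_dedup p c).mpr hc)

theorem contains_lastDict (p : List Char) (c : Char) :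
    (lastDict p).contains c = decide (c ∈ p) := by
  rw [PySem.Dict.contains_eq_decide_mem_keys]
  unfold lastDict
  rw [PySem.Dict.keys_mk]
  simp [Function.comp]

theorem values_lastDict (p : List Char) :
    (lastDict p).values = (PySem.List.dedup p).map (lastIdx p) := by
  unfold lastDict
  rw [PySem.Dict.values_mk, List.map_map]
  rfl

theorem size_lastDict (p : List Char) : (lastDict p).size = (PySem.List.dedup p).length := by
  unfold lastDict PySem.Dict.size
  simp

theorem dedup_append_mem {p : List Char} {c : Char} (hc : c ∈ p) :
    PySem.List.dedup (p ++ [c]) = PySem.List.dedup p := by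
  rw [PySem.List.dedup_eq_ofList, PySem.List.dedup_eq_ofList, PySem.Set.ofList_append_singleton,
    PySem.Set.add_of_mem ((PySem.Set.mem_ofList p c).mpr hc)]

theorem dedup_append_not_mem {p : List Char} {c : Char} (hc : c ∉ p) :
    PySem.List.dedup (p ++ [c]) = PySem.List.dedup p ++ [c] := by
  rw [PySem.List.dedup_eq_ofList, PySem.List.dedup_eq_ofList, PySem.Set.ofList_append_singleton,
    PySem.Set.add_of_not_mem (fun h => hc ((PySem.Set.mem_ofList p c).mp h))]

theorem dict_eq_of_items (d : PySem.Dict Char Int) (X : List (Char × Int))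
    (h : d.items = X) : d = PySem.Dict.mk X := by
  cases d
  simpa using h

theorem lastDict_insert (p : List Char) (c : Char) :
    (lastDict p).insert c ((p.length : Nat) : Int) = lastDict (p ++ [c]) := by
  by_cases hc : c ∈ p
  · have hcon : (lastDict p).contains c = true := by
      rw [contains_lastDict]; simpa using hc
    have hitems := PySem.Dict.items_insert_of_contains (lastDict p) ((p.length : Nat) : Int) hcon
    rw [dict_eq_of_items _ _ hitems]
    unfold lastDict
    rw [dedup_append_mem hc]
    congr 1
    rw [List.map_map]
    apply List.map_congr_left
    intro d _
    rcases eq_or_ne d c with h | h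
    · subst h; simp [lastIdx_append]
    · simp [Function.comp, h, lastIdx_append]
  · have hcon : (lastDict p).contains c = false := by
      rw [contains_lastDict]; simpa using hc
    have hitems := PySem.Dict.items_insert_of_not_contains (lastDict p) ((p.length : Nat) : Int) hcon
    rw [dict_eq_of_items _ _ hitems]
    unfold lastDict
    rw [dedup_append_not_mem hc]
    congr 1
    rw [List.map_append]
    congr 1
    · apply List.map_congr_left
      intro d hd
      have hdc : d ≠ c := fun h => hc (h ▸ (PySem.List.mem_dedup p d).mp hd)
      simp [lastIdx_append, hdc]
    · simp [lastIdx_append]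

theorem stepB_eq (alpha p : List Char) (c : Char) (out : List Int)
    (hpw : alpha.Pairwise (· < ·)) (hc : c ∈ alpha) :
    mtfStepB alpha (lastDict p, out) ((p.length : Int), c)
      = (lastDict (p ++ [c]),
         out ++ [((PySem.List.index? (recency p ++ unseen alpha p) c).getD 0 : Int)]) := by
  rw [index_char alpha p c hpw hc]
  simp only [mtfStepB, contains_lastDict]
  by_cases hcp : c ∈ p
  · rw [if_pos (by simpa using hcp), if_pos hcp]
    rw [lastDict_insert, Option.getD_some]
    congr 3
    rw [PySem.Dict.getD_eq_get?_getD, get?_lastDict p c hcp, Option.getD_some,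
      values_lastDict, List.countP_map]
    have hperm := (recency_perm_dedup p).countP_eq
      ((fun t => decide (lastIdx p c < t)) ∘ lastIdx p)
    exact_mod_cast hperm.symm
  · rw [if_neg (by simpa using hcp), if_neg hcp]
    rw [lastDict_insert, Option.getD_some]
    congr 3
    have hcount : (alpha.countP (fun d => decide (d < c) && !decide (d ∈ p)))
        = (unseen alpha p).countP (fun d => decide (d < c)) := by
      rw [unseen, List.countP_filter]
    rw [hcount, size_lastDict, (recency_perm_dedup p).length_eq]
    push_cast
    ring

theorem enumerate_cons (c : Char) (t : List Char) (s : Int) :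
    PySem.List.enumerate (c :: t) s = (s, c) :: PySem.List.enumerate t (s + 1) := rfl

theorem mtf_loop (alpha : List Char) (hpw : alpha.Pairwise (· < ·)) :
    ∀ (rest p : List Char) (out : List Int), (∀ c ∈ rest, c ∈ alpha) →
      List.foldl mtfStepA (out, recency p ++ unseen alpha p) rest
        = (((PySem.List.enumerate rest (p.length : Int)).foldl (mtfStepB alpha) (lastDict p, out)).2,
           recency (p ++ rest) ++ unseen alpha (p ++ rest)) := by
  intro rest
  induction rest with
  | nil => intro p out _; simp
  | cons c rest ih =>
      intro p out hmem
      have hc : c ∈ alpha := hmem c List.mem_cons_self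
      rw [List.foldl_cons, stepA_eq alpha p c out hpw hc,
        enumerate_cons, List.foldl_cons, stepB_eq alpha p c out hpw hc]
      have hlen : ((p.length : Int) + 1) = ((p ++ [c]).length : Int) := by simp
      rw [hlen, ih (p ++ [c]) _ (fun d hd => hmem d (List.mem_cons_of_mem c hd))]
      simp

-- ===== VERDICT (by name: the statement is the Claim_ definition above) =====
theorem transform_spec : Claim_equal_transform := by
  intro s _
  unfold Spec_transform transform transform_alt
  set cs := s.toList with hcs
  set alpha := PySem.List.sorted (PySem.Set.ofList cs) (fun c => c) false with halpha
  have hpw : alpha.Pairwise (· < ·) := PySem.List.sorted_ofList_pairwise_lt cs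
  have hmem : ∀ c ∈ cs, c ∈ alpha := by
    intro c hc
    rw [halpha, PySem.List.mem_sorted, PySem.Set.mem_ofList]
    exact hc
  have hinit : recency ([] : List Char) ++ unseen alpha [] = alpha := by
    simp [recency, unseen, PySem.List.dedup]
  have hdict : lastDict ([] : List Char) = PySem.Dict.empty := rfl
  have hloop := mtf_loop alpha hpw cs [] [] hmem
  rw [hinit, hdict] at hloop
  simp only [List.length_nil, List.nil_append] at hloop
  dsimp only
  rw [hloop]
  have hun : unseen alpha cs = [] := by
    rw [unseen, List.filter_eq_nil_iff]
    intro d hd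
    have : d ∈ cs := by
      rw [halpha, PySem.List.mem_sorted, PySem.Set.mem_ofList] at hd
      exact hd
    simp [this]
  rw [hun, List.append_nil]
  rfl
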